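-- pv_equiv track=rewrite | github.com/AnthonyAniobi/Algorithms_Python | challenges/kickstart2019A1.py | solution
-- ===== SOURCE A (Python) =====
-- from xmlrpc.client import MAXINT
--
-- def solution(n: int, p: int, s: list) -> int:
--     '''
--         Solution for the input: return integer
--     '''
--     min_count = MAXINT
--     for i in range(n-p+1):
--         max_value = max(s[i:])
--         sum_list = sum(s[i:])
--         current_count = max_value*p - sum_list
--         if current_count < min_count:
--             min_count = current_count
--
--     return min_count
-- ===== SOURCE B (Python) =====
-- MAXINT = 2**31 - 1  # xmlrpc.client.MAXINT
--
-- def solution(n: int, p: int, s: list) -> int: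
--     # One reverse pass: maintain suffix max and suffix sum instead of rescanning s[i:].
--     best = MAXINT
--     limit = n - p
--     if limit < 0:
--         return best  # range(n-p+1) is empty: no candidates
--     tail = s[limit:]
--     suf_max = max(tail)
--     suf_sum = sum(tail)
--     c = suf_max * p - suf_sum
--     if c < best:
--         best = c
--     for x in reversed(s[:limit]):
--         suf_sum += x
--         if x > suf_max:
--             suf_max = x
--         c = suf_max * p - suf_sum
--         if c < best:
--             best = c
--     return best
-- ===== Notes on version B (the rewrite author's own statement) =====
-- stated objective: alternative
-- what changed: A rescans the whole suffix with max(s[i:]) and sum(s[i:]) for every i (O(n^2)); B computes max/sum of the last suffix once and then makes a single reverse pass over the prefix, maintaining the running suffix max and suffix sum, emitting each candidate in O(1).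
import Mathlib
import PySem

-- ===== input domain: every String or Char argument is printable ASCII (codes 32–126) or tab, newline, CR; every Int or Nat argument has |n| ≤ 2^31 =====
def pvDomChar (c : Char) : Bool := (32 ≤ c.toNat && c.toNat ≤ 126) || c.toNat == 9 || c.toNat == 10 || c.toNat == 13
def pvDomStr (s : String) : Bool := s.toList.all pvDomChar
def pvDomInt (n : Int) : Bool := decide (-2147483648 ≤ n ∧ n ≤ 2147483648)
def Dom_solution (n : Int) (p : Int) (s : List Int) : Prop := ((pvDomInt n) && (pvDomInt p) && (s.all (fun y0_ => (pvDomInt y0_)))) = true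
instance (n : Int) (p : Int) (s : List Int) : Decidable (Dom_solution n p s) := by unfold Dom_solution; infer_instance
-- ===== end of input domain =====

-- B replaces A's per-i rescans max(s[i:])/sum(s[i:]) by one reverse pass that maintains
-- the running suffix max and suffix sum (objective: alternative algorithm).

-- ===== PORT A =====
-- literal port of A: for i in range(n-p+1): max(s[i:])*p - sum(s[i:]); keep the minimum.
-- (the 'none' branch of max? is Python's ValueError on an empty slice; excluded by Pre_)
def solution (n : Int) (p : Int) (s : List Int) : Int :=
  (PySem.List.pyRange 0 (n - p + 1) 1).foldl
    (fun min_count i =>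
      let tail := PySem.List.slice s (some i) none
      match PySem.List.max? tail (fun y => y) with
      | some max_value =>
          let sum_list := tail.sum
          let current_count := max_value * p - sum_list
          if current_count < min_count then current_count else min_count
      | none => min_count)
    2147483647

-- ===== PORT B =====
-- one step of Source B's loop body: state (suf_max, suf_sum, best), element x
def solutionAltStep (p : Int) (x : Int) (st : Int × Int × Int) : Int × Int × Int :=
  let m := if x > st.1 then x else st.1
  let ssum := st.2.1 + x
  let c := m * p - ssum
  (m, ssum, if c < st.2.2 then c else st.2.2)

-- port of Source B: early return on an empty range; max/sum of the tail s[limit:];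
-- then 'for x in reversed(s[:limit])' = a right fold over the prefix.
-- (the 'none' branch of max? is Python's ValueError on max([]); excluded by Pre_)
def solution_alt (n : Int) (p : Int) (s : List Int) : Int :=
  if n - p < 0 then 2147483647
  else
    let tail := PySem.List.slice s (some (n - p)) none
    match PySem.List.max? tail (fun y => y) with
    | none => 2147483647
    | some suf_max =>
      let suf_sum := tail.sum
      let c := suf_max * p - suf_sum
      let best := if c < 2147483647 then c else 2147483647
      ((PySem.List.slice s none (some (n - p))).foldr (solutionAltStep p)
        (suf_max, suf_sum, best)).2.2

-- ===== PRECONDITION & SPEC =====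
-- Pre_ excludes exactly the inputs where A raises: 0 ≤ n-p together with n-p ≥ len(s)
-- makes A evaluate max(s[i:]) on an empty slice (ValueError).
def Pre_solution (n : Int) (p : Int) (s : List Int) : Prop :=
  n - p + 1 ≤ 0 ∨ n - p < (s.length : Int)
instance (n : Int) (p : Int) (s : List Int) : Decidable (Pre_solution n p s) := by
  unfold Pre_solution; infer_instance

def pvWitness_solution : Int × Int × List Int := (3, 2, [3, 1, 2])

def Spec_solution (n : Int) (p : Int) (s : List Int) (out : Int) : Prop := out = solution_alt n p s
instance (n : Int) (p : Int) (s : List Int) (out : Int) : Decidable (Spec_solution n p s out) := by unfold Spec_solution; infer_instance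

-- ===== CLAIM (what is proved, stated in full; the proofs are below) =====
def Claim_equal_solution : Prop := ∀ (n : Int) (p : Int) (s : List Int), Dom_solution n p s → Pre_solution n p s → Spec_solution n p s (solution n p s)

-- ===== LEMMAS AND PROOFS =====

-- max of a nonempty list, written as Python's running max from its head (0 for [])
def headMaxD : List Int → Int
  | [] => 0
  | z :: zs => zs.foldl max z

-- the candidate at index k : max of the suffix s.drop k times p, minus its sum
def solCand (p : Int) (s : List Int) (k : Nat) : Int :=
  headMaxD (s.drop k) * p - (s.drop k).sum

theorem foldl_max_shift (l : List Int) : ∀ (a b : Int), l.foldl max (max a b) = max a (l.foldl max b) := by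
  induction l with
  | nil => intro a b; rfl
  | cons x l ih => intro a b; simp only [List.foldl_cons, max_assoc, ih]

theorem foldr_min_shift (l : List Int) : ∀ (a b : Int), l.foldr min (min a b) = min b (l.foldr min a) := by
  induction l with
  | nil => intro a b; exact min_comm a b
  | cons x l ih => intro a b; simp [List.foldr_cons, ih, min_left_comm]

theorem foldl_min_eq_foldr (l : List Int) : ∀ (a : Int), l.foldl min a = l.foldr min a := by
  induction l with
  | nil => intro a; rfl
  | cons x l ih => intro a; simp only [List.foldl_cons, List.foldr_cons, ih, foldr_min_shift]

theorem headMaxD_append (a : List Int) (y : Int) (ys : List Int) :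
    headMaxD (a ++ y :: ys) = a.foldl max (headMaxD (y :: ys)) := by
  cases a with
  | nil => rfl
  | cons x xs =>
    show (xs ++ y :: ys).foldl max x = xs.foldl max (max (ys.foldl max y) x)
    rw [List.foldl_append, List.foldl_cons, foldl_max_shift ys (xs.foldl max x) y,
      foldl_max_shift xs (ys.foldl max y) x, max_comm]

theorem altFold (p : Int) (u : List Int) : ∀ (m0 ssum0 best0 : Int),
    u.foldr (solutionAltStep p) (m0, ssum0, best0) =
      (u.foldl max m0, u.sum + ssum0,
       ((List.range u.length).map
         (fun k => (u.drop k).foldl max m0 * p - ((u.drop k).sum + ssum0))).foldr min best0) := by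
  induction u with
  | nil => intro m0 ssum0 best0; simp
  | cons x rest ih =>
    intro m0 ssum0 best0
    rw [List.foldr_cons, ih m0 ssum0 best0]
    unfold solutionAltStep
    dsimp only
    have hmx : (if x > rest.foldl max m0 then x else rest.foldl max m0)
        = max x (rest.foldl max m0) := by rw [max_def]; split_ifs <;> omega
    have hmap : List.map ((fun k => (List.drop k (x :: rest)).foldl max m0 * p
          - ((List.drop k (x :: rest)).sum + ssum0)) ∘ Nat.succ) (List.range rest.length)
        = List.map (fun k => (List.drop k rest).foldl max m0 * p
          - ((List.drop k rest).sum + ssum0)) (List.range rest.length) :=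
      List.map_congr_left (fun a _ => rfl)
    refine Prod.ext ?_ (Prod.ext ?_ ?_)
    · dsimp only
      rw [hmx, List.foldl_cons, max_comm m0 x, foldl_max_shift]
    · dsimp only
      rw [List.sum_cons]; ring
    · dsimp only
      rw [List.length_cons, List.range_succ_eq_map, List.map_cons, List.map_map, List.foldr_cons,
        hmap, hmx]
      rw [show ((x :: rest).drop 0).foldl max m0 = rest.foldl max (max m0 x) from List.foldl_cons ..]
      rw [max_comm m0 x, foldl_max_shift]
      rw [show ((x :: rest).drop 0).sum = x + rest.sum from List.sum_cons ..]
      rw [min_def]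
      split_ifs <;> omega

-- ===== VERDICT (by name: the statement is the Claim_ definition above) =====
theorem solution_spec : Claim_equal_solution := by
  intro n p s _hdom hpre
  unfold Spec_solution solution solution_alt
  by_cases hneg : n - p < 0
  · rw [if_pos hneg, PySem.List.pyRange_one_eq_nil (by omega)]
    rfl
  · rw [if_neg hneg]
    have hlen : n - p < (s.length : Int) := hpre.resolve_left (by omega)
    have h0 : (0 : Int) ≤ n - p := by omega
    have hLs : (n - p).toNat < s.length := by omega
    -- the tail s[limit:] is nonempty
    simp only [PySem.List.slice_from s h0, PySem.List.slice_to s h0]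
    obtain ⟨y, ys, hdrop⟩ : ∃ y ys, s.drop (n - p).toNat = y :: ys := by
      cases hd : s.drop (n - p).toNat with
      | nil => exact absurd (List.drop_eq_nil_iff.mp hd) (by omega)
      | cons y ys => exact ⟨y, ys, rfl⟩
    rw [hdrop, PySem.List.max?_id_cons]
    simp only
    rw [altFold]
    -- A's side: the foldl over range(n-p+1) is the foldr min over the candidates
    rw [PySem.List.pyRange_one, List.foldl_map]
    have hr : (n - p + 1 - 0).toNat = (n - p).toNat + 1 := by omega
    rw [hr]
    rw [PySem.List.foldl_congr_mem _ _ (fun mc k => min mc (solCand p s k)) _ ?hbody]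
    · rw [← List.foldl_map, foldl_min_eq_foldr]
      -- split off the last candidate k = n-p and identify the rest with B's fold
      rw [List.range_succ, List.map_append, List.foldr_append]
      have htake : (s.take (n - p).toNat).length = (n - p).toNat := by
        rw [List.length_take]; omega
      rw [htake]
      have hsplit : ∀ k, k ≤ (n - p).toNat →
          s.drop k = ((s.take (n - p).toNat).drop k) ++ y :: ys := by
        intro k hk
        conv_lhs => rw [← List.take_append_drop ((n - p).toNat) s]
        rw [List.drop_append_of_le_length (by rw [htake]; omega), hdrop]
      dsimp only
      have hminif : ∀ a b : Int, (if a < b then a else b) = min a b := by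
        intro a b; rw [min_def]; split_ifs <;> omega
      have hcL : solCand p s ((n - p).toNat) = List.foldl max y ys * p - (y :: ys).sum := by
        simp [solCand, hdrop, headMaxD]
      have hmapc : List.map (solCand p s) (List.range ((n - p).toNat))
          = List.map (fun k => ((s.take (n - p).toNat).drop k).foldl max (List.foldl max y ys) * p
              - (((s.take (n - p).toNat).drop k).sum + (y :: ys).sum)) (List.range ((n - p).toNat)) :=
        List.map_congr_left (fun k hk => by
          have hk' : k ≤ (n - p).toNat := le_of_lt (List.mem_range.mp hk)
          simp only [solCand, hsplit k hk']
          rw [headMaxD_append]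
          simp only [headMaxD, List.sum_append])
      rw [hmapc, List.map_cons, List.map_nil, List.foldr_cons, List.foldr_nil, hcL, hminif]
    case hbody =>
      intro acc k hk
      have hk' : k < s.length := by
        have := List.mem_range.mp hk; omega
      simp only [zero_add]
      rw [PySem.List.slice_from_natCast]
      obtain ⟨z, zs, hdropk⟩ : ∃ z zs, s.drop k = z :: zs := by
        cases hd : s.drop k with
        | nil => exact absurd (List.drop_eq_nil_iff.mp hd) (by omega)
        | cons z zs => exact ⟨z, zs, rfl⟩
      rw [hdropk, PySem.List.max?_id_cons]
      simp only [solCand, hdropk, headMaxD]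
      rw [min_def]
      split_ifs <;> omega
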